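-- pv_equiv track=rewrite | github.com/ruben-ucl/ME1573_data_processing | ml/hyperparameter_tuner.py | _generate_grid_configs_from_space
-- ===== SOURCE A (Python) =====
-- from itertools import product
--
-- def _generate_grid_configs_from_space(param_space, base_config):
--     """Generate all combinations from parameter space with custom base config."""
--     param_names = list(param_space.keys())
--     param_values = list(param_space.values())
--
--     configs = []
--     for combination in product(*param_values):
--         config = base_config.copy()
--         for name, value in zip(param_names, combination):
--             config[name] = value
--         configs.append(config)
--
--     return configs
-- ===== SOURCE B (Python) =====
-- def _generate_grid_configs_from_space(param_space, base_config):
--     """Iterative expansion: grow the grid one parameter dimension at a time."""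
--     configs = [base_config.copy()]
--     for name, values in param_space.items():
--         configs = [dict(c, **{name: v}) for c in configs for v in values]
--     return configs
-- ===== Notes on version B (the rewrite author's own statement) =====
-- stated objective: alternative
-- what changed: Replaced itertools.product enumeration of full value tuples (with an inner zip/assignment loop per tuple) by iterative expansion: start from [base_config.copy()] and, for each parameter in turn, rebuild the list by extending every partial config with each value of that parameter.
import Mathlib
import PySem

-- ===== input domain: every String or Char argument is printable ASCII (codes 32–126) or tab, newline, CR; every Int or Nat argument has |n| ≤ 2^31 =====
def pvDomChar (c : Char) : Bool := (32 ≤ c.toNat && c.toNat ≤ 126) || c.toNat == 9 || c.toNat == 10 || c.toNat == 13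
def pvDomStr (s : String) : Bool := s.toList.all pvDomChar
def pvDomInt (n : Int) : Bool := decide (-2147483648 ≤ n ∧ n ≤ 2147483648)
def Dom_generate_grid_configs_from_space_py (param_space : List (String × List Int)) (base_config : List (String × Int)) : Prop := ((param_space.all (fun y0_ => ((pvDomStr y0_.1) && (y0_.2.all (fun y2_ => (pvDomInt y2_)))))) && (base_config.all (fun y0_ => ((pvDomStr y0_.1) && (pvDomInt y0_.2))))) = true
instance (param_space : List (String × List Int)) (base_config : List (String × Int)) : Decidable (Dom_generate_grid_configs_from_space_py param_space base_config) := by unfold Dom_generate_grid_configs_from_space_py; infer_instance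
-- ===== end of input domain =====

-- ===== PORT A =====
-- B differs from A by iterative per-parameter expansion instead of itertools.product; same return value.
-- shared dict-assignment primitive: config[name] = value on an insertion-ordered assoc list
def pvDictSet (d : List (String × Int)) (k : String) (v : Int) : List (String × Int) :=
  match d with
  | [] => [(k, v)]
  | (k', v') :: rest => if k' == k then (k', v) :: rest else (k', v') :: pvDictSet rest k v

-- itertools.product(*value_lists): first list varies slowest
def pvProduct (ls : List (List Int)) : List (List Int) :=
  ls.foldr (fun vs acc => vs.flatMap (fun v => acc.map (fun c => v :: c))) [[]]

def generate_grid_configs_from_space_py (param_space : List (String × List Int)) (base_config : List (String × Int)) : List (List (String × Int)) :=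
  let param_names := param_space.map Prod.fst
  let param_values := param_space.map Prod.snd
  (pvProduct param_values).foldl
    (fun configs combination =>
      configs ++ [(param_names.zip combination).foldl (fun c nv => pvDictSet c nv.1 nv.2) base_config])
    []

-- ===== PORT B =====
def generate_grid_configs_from_space_py_alt (param_space : List (String × List Int)) (base_config : List (String × Int)) : List (List (String × Int)) :=
  param_space.foldl
    (fun configs p => configs.flatMap (fun c => p.2.map (fun v => pvDictSet c p.1 v)))
    [base_config]

-- ===== PRECONDITION & SPEC =====
def Spec_generate_grid_configs_from_space_py (param_space : List (String × List Int)) (base_config : List (String × Int)) (out : List (List (String × Int))) : Prop := out = generate_grid_configs_from_space_py_alt param_space base_config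
instance (param_space : List (String × List Int)) (base_config : List (String × Int)) (out : List (List (String × Int))) : Decidable (Spec_generate_grid_configs_from_space_py param_space base_config out) := by unfold Spec_generate_grid_configs_from_space_py; infer_instance

-- ===== CLAIM (what is proved, stated in full; the proofs are below) =====
def Claim_equal_generate_grid_configs_from_space_py : Prop := ∀ (param_space : List (String × List Int)) (base_config : List (String × Int)), Dom_generate_grid_configs_from_space_py param_space base_config → Spec_generate_grid_configs_from_space_py param_space base_config (generate_grid_configs_from_space_py param_space base_config)

-- ===== LEMMAS AND PROOFS =====

-- A unfolds on a cons: the head parameter's values distribute over the remaining product.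
theorem genA_cons (n : String) (vs : List Int) (ps : List (String × List Int)) (base : List (String × Int)) :
    generate_grid_configs_from_space_py ((n, vs) :: ps) base
      = vs.flatMap (fun v => generate_grid_configs_from_space_py ps (pvDictSet base n v)) := by
  simp [generate_grid_configs_from_space_py, pvProduct,
        List.map_flatMap, List.map_map,
        Function.comp_def, List.flatten_eq_flatMap, List.flatMap_assoc, List.flatMap_map]

-- B's fold, started from any list of configs, is the flatMap of B started from each singleton:
theorem genB_expand (ps : List (String × List Int)) (L : List (List (String × Int))) :
    ps.foldl (fun configs p => configs.flatMap (fun c => p.2.map (fun v => pvDictSet c p.1 v))) L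
      = L.flatMap (fun b =>
          ps.foldl (fun configs p => configs.flatMap (fun c => p.2.map (fun v => pvDictSet c p.1 v))) [b]) := by
  induction ps generalizing L with
  | nil => simp
  | cons p ps ih =>
      simp only [List.foldl_cons]
      rw [ih, List.flatMap_assoc]
      congr 1
      funext b
      rw [ih]
      simp

theorem genB_cons (n : String) (vs : List Int) (ps : List (String × List Int)) (base : List (String × Int)) :
    generate_grid_configs_from_space_py_alt ((n, vs) :: ps) base
      = vs.flatMap (fun v => generate_grid_configs_from_space_py_alt ps (pvDictSet base n v)) := by
  simp only [generate_grid_configs_from_space_py_alt, List.foldl_cons]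
  rw [genB_expand]
  simp [List.flatMap_map]

-- ===== VERDICT (by name: the statement is the Claim_ definition above) =====
theorem generate_grid_configs_from_space_py_spec : Claim_equal_generate_grid_configs_from_space_py := by
  intro ps base hdom
  clear hdom
  unfold Spec_generate_grid_configs_from_space_py
  induction ps generalizing base with
  | nil => simp [generate_grid_configs_from_space_py, generate_grid_configs_from_space_py_alt, pvProduct]
  | cons p ps ih =>
      obtain ⟨n, vs⟩ := p
      rw [genA_cons, genB_cons]
      simp only [ih]
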